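-- pv_equiv track=rewrite | github.com/jamesben6688/coding | dfs/德州扑克替换一张.py | can_form_4_valid_hands
-- ===== SOURCE A (Python) =====
-- from itertools import combinations
-- from collections import Counter
--
-- def parse_card(card):
--     if card[:-1] == "10":
--         return "10", card[-1]
--     return card[:-1], card[-1]
--
-- ROYAL_VALUES = {"10", "J", "Q", "K", "A"}
--
-- def is_royal_flush(hand):
--     values = set()
--     suits = set()
--     for card in hand:
--         value, suit = parse_card(card)
--         values.add(value)
--         suits.add(suit)
--     return len(suits) == 1 and values == ROYAL_VALUES
--
-- def is_four_of_a_kind(hand):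
--     values = [parse_card(card)[0] for card in hand]
--     counter = Counter(values)
--     return 4 in counter.values()
--
-- def valid_hand(hand):
--     return is_royal_flush(hand) or is_four_of_a_kind(hand)
--
-- def can_form_4_valid_hands(cards):
--     all_valid_hands = []
--     card_indices = {card: i for i, card in enumerate(cards)}
--
--     for combo in combinations(cards, 5):
--         if valid_hand(combo):
--             indices = set(card_indices[c] for c in combo)
--             if len(indices) == 5:
--                 all_valid_hands.append(indices)
--
--     def dfs(start, chosen):
--         if len(chosen) == 4:
--             return True
--         for i in range(start, len(all_valid_hands)):
--             hand = all_valid_hands[i]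
--             if all(len(hand & c) == 0 for c in chosen):
--                 if dfs(i + 1, chosen + [hand]):
--                     return True
--         return False
--
--     return dfs(0, [])
-- ===== SOURCE B (Python) =====
-- from itertools import combinations
--
-- ROYAL_VALUES = {"10", "J", "Q", "K", "A"}
--
-- def can_form_4_valid_hands(cards):
--     distinct = list(dict.fromkeys(cards))
--
--     def good(hand):
--         vals = [c[:-1] for c in hand]
--         if any(vals.count(v) == 4 for v in vals):
--             return True
--         return len({c[-1] for c in hand}) == 1 and set(vals) == ROYAL_VALUES
--
--     hands = [set(h) for h in combinations(distinct, 5) if good(h)]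
--     return any(
--         all(len(a & b) == 0 for a, b in combinations(q, 2))
--         for q in combinations(hands, 4)
--     )
-- ===== Notes on version B (the rewrite author's own statement) =====
-- stated objective: simpler
-- what changed: B first deduplicates the cards (list(dict.fromkeys)) and enumerates 5-combinations of the distinct cards as card sets with a count-based validity test (no parse_card helper, no last-index dict, no index sets), then replaces the recursive backtracking dfs by a direct scan of combinations(hands, 4) for a pairwise-disjoint quadruple.
import Mathlib
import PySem

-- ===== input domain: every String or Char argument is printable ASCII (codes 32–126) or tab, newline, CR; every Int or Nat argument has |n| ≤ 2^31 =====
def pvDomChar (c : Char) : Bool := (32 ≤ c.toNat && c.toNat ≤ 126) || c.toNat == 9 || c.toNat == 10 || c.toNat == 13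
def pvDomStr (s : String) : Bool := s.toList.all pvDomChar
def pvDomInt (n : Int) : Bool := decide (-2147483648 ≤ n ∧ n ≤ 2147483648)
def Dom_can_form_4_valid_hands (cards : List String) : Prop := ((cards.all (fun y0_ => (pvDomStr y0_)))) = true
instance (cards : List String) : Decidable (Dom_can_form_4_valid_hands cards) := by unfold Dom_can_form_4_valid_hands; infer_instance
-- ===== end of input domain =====

-- B deduplicates the cards first, enumerates 5-combinations of the distinct cards as card sets
-- with a count-based validity test (no parse_card helper, no last-index dict, no index sets),
-- and replaces the recursive backtracking dfs by a direct scan of combinations(hands, 4) for a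
-- pairwise-disjoint quadruple (simpler).

-- ===== PORT A =====
-- cards are modelled as List Char (Python str); helpers of source A.
-- parse_card: card[-1] via pyGetD is exact for nonempty card; Pre_ keeps every parsed card nonempty.
def pvParseCard (cs : List Char) : List Char × Char :=
  if PySem.List.slice cs none (some (-1)) = ['1', '0'] then
    (['1', '0'], PySem.List.pyGetD cs (-1) ' ')
  else
    (PySem.List.slice cs none (some (-1)), PySem.List.pyGetD cs (-1) ' ')

def pvRoyalValues : PySem.Set (List Char) :=
  PySem.Set.ofList [['1','0'], ['J'], ['Q'], ['K'], ['A']]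

def pvIsRoyalFlush (hand : List (List Char)) : Bool :=
  let vs : PySem.Set (List Char) × PySem.Set Char :=
    hand.foldl
      (fun p card =>
        let pc := pvParseCard card
        (PySem.Set.add p.1 pc.1, PySem.Set.add p.2 pc.2))
      (PySem.Set.empty, PySem.Set.empty)
  (PySem.Set.len vs.2 == 1) && PySem.Set.equal vs.1 pvRoyalValues

def pvIsFourOfAKind (hand : List (List Char)) : Bool :=
  let vals := hand.map (fun card => (pvParseCard card).1)
  let counter := PySem.Dict.counter vals
  (PySem.Dict.values counter).contains (4 : Int)

def pvValidHand (hand : List (List Char)) : Bool :=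
  pvIsRoyalFlush hand || pvIsFourOfAKind hand

-- the all_valid_hands list: card_indices dict (last index wins), 5-combinations in itertools
-- order, the len(indices) == 5 guard.  card_indices[c] via getD: c ∈ cards, so no KeyError.
def pvAllValidHands (cards : List (List Char)) : List (PySem.Set Int) :=
  let card_indices : PySem.Dict (List Char) Int :=
    (PySem.List.enumerate cards 0).foldl (fun d p => d.insert p.2 p.1) PySem.Dict.empty
  (PySem.List.combinations cards 5).foldl
    (fun acc combo =>
      if pvValidHand combo then
        let indices : PySem.Set Int :=
          combo.foldl (fun s c => PySem.Set.add s (card_indices.getD c (-1))) PySem.Set.empty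
        if PySem.Set.len indices == 5 then acc ++ [indices] else acc
      else acc)
    []

-- A's dfs: recursion over the remaining suffix of all_valid_hands (i ranging over start..n).
def pvDfs (chosen : List (PySem.Set Int)) (rest : List (PySem.Set Int)) : Bool :=
  if chosen.length == 4 then true
  else
    match rest with
    | [] => false
    | h :: t =>
      if (chosen.all fun c => PySem.Set.len (PySem.Set.inter h c) == 0) && pvDfs (chosen ++ [h]) t then
        true
      else
        pvDfs chosen t
termination_by rest.length

def can_form_4_valid_hands (cards : List String) : Bool :=
  pvDfs [] (pvAllValidHands (cards.map String.toList))

-- ===== PORT B =====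
-- good(hand): value = card[:-1] (no "10" special case needed), four-of-a-kind by vals.count,
-- royal flush by suit-set size and value-set equality; card[-1] via pyGetD is exact for
-- nonempty cards (Pre_ keeps every card reached here nonempty).
def pvGoodAlt (hand : List (List Char)) : Bool :=
  let vals := hand.map (fun c => PySem.List.slice c none (some (-1)))
  if vals.any (fun v => PySem.List.count vals v == (4 : Int)) then true
  else
    (PySem.Set.len (PySem.Set.ofList (hand.map (fun c => PySem.List.pyGetD c (-1) ' '))) == 1)
      && PySem.Set.equal (PySem.Set.ofList vals) pvRoyalValues

def can_form_4_valid_hands_alt (cards : List String) : Bool :=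
  let distinct := PySem.List.dedup (cards.map String.toList)
  let hands := ((PySem.List.combinations distinct 5).filter pvGoodAlt).map PySem.Set.ofList
  (PySem.List.combinations hands 4).any fun q =>
    (PySem.List.combinations q 2).all fun pr =>
      match pr with
      | [a, b] => PySem.Set.len (PySem.Set.inter a b) == 0
      | _ => true

-- ===== PRECONDITION & SPEC =====
-- Pre_ excludes exactly the inputs where the Python A raises: with at least 5 cards every card
-- occurs in some 5-combination, and parse_card does card[-1] (IndexError on the empty string).
def Pre_can_form_4_valid_hands (cards : List String) : Prop :=
  cards.length < 5 ∨ "" ∉ cards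
instance (cards : List String) : Decidable (Pre_can_form_4_valid_hands cards) := by
  unfold Pre_can_form_4_valid_hands; infer_instance

def pvWitness_can_form_4_valid_hands : List String := ["10h", "Jh", "Qh", "Kh", "Ah"]

def Spec_can_form_4_valid_hands (cards : List String) (out : Bool) : Prop := out = can_form_4_valid_hands_alt cards
instance (cards : List String) (out : Bool) : Decidable (Spec_can_form_4_valid_hands cards out) := by unfold Spec_can_form_4_valid_hands; infer_instance

-- ===== CLAIM (what is proved, stated in full; the proofs are below) =====
def Claim_equal_can_form_4_valid_hands : Prop := ∀ (cards : List String), Dom_can_form_4_valid_hands cards → Pre_can_form_4_valid_hands cards → Spec_can_form_4_valid_hands cards (can_form_4_valid_hands cards)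

-- ===== LEMMAS AND PROOFS =====

-- ----- A-side loop shape: dfs finds a pairwise-compatible 4-combination -----

-- the disjointness test both quadruple scans run on a 2-combination
def pvPairOk {γ : Type} [BEq γ] (pr : List (PySem.Set γ)) : Bool :=
  match pr with
  | [a, b] => PySem.Set.len (PySem.Set.inter a b) == 0
  | _ => true

-- the chain of disjointness checks dfs performs along one extension ext of chosen
def pvGood (chosen : List (PySem.Set Int)) (ext : List (PySem.Set Int)) : Bool :=
  match ext with
  | [] => true
  | h :: t => (chosen.all fun c => PySem.Set.len (PySem.Set.inter h c) == 0) && pvGood (chosen ++ [h]) t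

theorem pvDisjSym (a b : PySem.Set Int) :
    (PySem.Set.len (PySem.Set.inter a b) == 0) = (PySem.Set.len (PySem.Set.inter b a) == 0) := by
  rw [Bool.eq_iff_iff]
  simp only [PySem.Set.len, PySem.Set.inter, beq_iff_eq, Nat.cast_eq_zero,
    List.length_eq_zero_iff, List.filter_eq_nil_iff]
  constructor <;> intro h x hx hc <;> simp_all

theorem pvAnyAndConst (l : List (List (PySem.Set Int))) (c : Bool)
    (f : List (PySem.Set Int) → Bool) :
    (l.any fun x => c && f x) = (c && l.any f) := by
  cases c <;> simp

theorem pvDfs_eq_any (rest : List (PySem.Set Int)) :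
    ∀ (chosen : List (PySem.Set Int)) (k : Nat), chosen.length + k = 4 →
      pvDfs chosen rest = (PySem.List.combinations rest k).any (pvGood chosen) := by
  induction rest with
  | nil =>
    intro chosen k hk
    cases k with
    | zero =>
      have h4 : chosen.length = 4 := by omega
      simp [pvDfs, h4, PySem.List.combinations_zero, pvGood]
    | succ k' =>
      rw [pvDfs]
      have : ¬ chosen.length = 4 := by omega
      simp [this, PySem.List.combinations_nil_succ]
  | cons h t ih =>
    intro chosen k hk
    cases k with
    | zero =>
      have h4 : chosen.length = 4 := by omega
      simp [pvDfs, h4, PySem.List.combinations_zero, pvGood]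
    | succ k' =>
      have hlen : ¬ chosen.length = 4 := by omega
      rw [pvDfs]
      simp only [beq_iff_eq, hlen, if_false]
      rw [PySem.List.combinations_cons_succ, List.any_append, List.any_map]
      simp only [Function.comp_def]
      have h1 : ((PySem.List.combinations t k').any fun e => pvGood chosen (h :: e))
          = ((chosen.all fun c => PySem.Set.len (PySem.Set.inter h c) == 0)
              && pvDfs (chosen ++ [h]) t) := by
        have : (fun e => pvGood chosen (h :: e))
            = (fun e => (chosen.all fun c => PySem.Set.len (PySem.Set.inter h c) == 0)
                 && pvGood (chosen ++ [h]) e) := by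
          funext e; simp [pvGood]
        rw [this, pvAnyAndConst, ih (chosen ++ [h]) k' (by simp; omega)]
      rw [h1, ih chosen (k' + 1) hk]
      cases hc : ((chosen.all fun c => PySem.Set.len (PySem.Set.inter h c) == 0)
          && pvDfs (chosen ++ [h]) t) <;> simp

theorem pvGood_eq_pairs (quad : List (PySem.Set Int)) (hq : quad.length = 4) :
    pvGood [] quad
      = (PySem.List.combinations quad 2).all pvPairOk := by
  match quad, hq with
  | [a, b, c, d], _ =>
    simp only [pvGood, List.all_cons, List.all_nil, List.nil_append,
      PySem.List.combinations_cons_succ,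
      PySem.List.combinations_nil_succ, PySem.List.combinations_one,
      List.map_cons, List.map_nil, List.append_nil, List.all_append, Bool.and_true, pvPairOk]
    rw [pvDisjSym b a, pvDisjSym c a, pvDisjSym c b, pvDisjSym d a, pvDisjSym d b, pvDisjSym d c]
    cases PySem.Set.len (PySem.Set.inter a b) == 0 <;>
      cases PySem.Set.len (PySem.Set.inter a c) == 0 <;>
        cases PySem.Set.len (PySem.Set.inter a d) == 0 <;>
          cases PySem.Set.len (PySem.Set.inter b c) == 0 <;>
            cases PySem.Set.len (PySem.Set.inter b d) == 0 <;>
              cases PySem.Set.len (PySem.Set.inter c d) == 0 <;> rfl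

-- ----- generic: the Bool quadruple scan as an existence statement -----

theorem pvDisjIff {γ : Type} [BEq γ] [LawfulBEq γ] (a b : PySem.Set γ) :
    (PySem.Set.len (PySem.Set.inter a b) == 0) = true ↔ ∀ x ∈ a, x ∉ b := by
  simp only [PySem.Set.len, PySem.Set.inter, beq_iff_eq, Nat.cast_eq_zero,
    List.length_eq_zero_iff, List.filter_eq_nil_iff]
  constructor <;> intro h x hx hc <;> simp_all

theorem pvAnyQuadIff {γ : Type} [BEq γ] [LawfulBEq γ] (l : List (PySem.Set γ)) :
    ((PySem.List.combinations l 4).any fun q =>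
        (PySem.List.combinations q 2).all pvPairOk) = true
      ↔ ∃ s : List (PySem.Set γ), s.Sublist l ∧ s.length = 4 ∧ s.Pairwise (fun a b => ∀ x ∈ a, x ∉ b) := by
  rw [List.any_eq_true]
  constructor
  · rintro ⟨q, hq, hall⟩
    obtain ⟨hsub, hlen⟩ := (PySem.List.mem_combinations_iff _ _ _).1 hq
    refine ⟨q, hsub, hlen, List.pairwise_iff_forall_sublist.2 ?_⟩
    intro a b hab
    have : [a, b] ∈ PySem.List.combinations q 2 :=
      (PySem.List.mem_combinations_iff _ _ _).2 ⟨hab, rfl⟩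
    have h2 := List.all_eq_true.1 hall _ this
    exact (pvDisjIff a b).1 h2
  · rintro ⟨s, hsub, hlen, hpw⟩
    refine ⟨s, (PySem.List.mem_combinations_iff _ _ _).2 ⟨hsub, hlen⟩, List.all_eq_true.2 ?_⟩
    intro pr hpr
    obtain ⟨hprs, hprl⟩ := (PySem.List.mem_combinations_iff _ _ _).1 hpr
    match pr, hprl with
    | [a, b], _ =>
      show (PySem.Set.len (PySem.Set.inter a b) == 0) = true
      exact (pvDisjIff a b).2 (List.pairwise_iff_forall_sublist.1 hpw hprs)

-- ----- generic transfer of the existence statement along a relation -----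

theorem pvPickList {α β : Type} (P : α → β → Prop) :
    ∀ (s : List α), (∀ x ∈ s, ∃ y, P x y) → ∃ t, List.Forall₂ P s t := by
  intro s
  induction s with
  | nil => intro _; exact ⟨[], List.Forall₂.nil⟩
  | cons x s ih =>
    intro h
    obtain ⟨y, hy⟩ := h x (List.mem_cons_self)
    obtain ⟨t, ht⟩ := ih (fun z hz => h z (List.mem_cons_of_mem _ hz))
    exact ⟨y :: t, List.Forall₂.cons hy ht⟩

theorem pvForall₂Mem {α β : Type} {P : α → β → Prop} :
    ∀ {s : List α} {t : List β}, List.Forall₂ P s t → ∀ y ∈ t, ∃ x ∈ s, P x y := by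
  intro s t F
  induction F with
  | nil => intro y hy; cases hy
  | @cons x y s t hxy F ih =>
    intro y' hy'
    rcases List.mem_cons.1 hy' with h | h
    · exact ⟨x, List.mem_cons_self, h ▸ hxy⟩
    · obtain ⟨x', hx', hP⟩ := ih y' h
      exact ⟨x', List.mem_cons_of_mem _ hx', hP⟩

theorem pvForall₂Pairwise {α β : Type} {P : α → β → Prop} {R₁ : α → α → Prop}
    {R₂ : β → β → Prop} (hR : ∀ x x' y y', P x y → P x' y' → R₁ x x' → R₂ y y') :
    ∀ {s : List α} {t : List β}, List.Forall₂ P s t → s.Pairwise R₁ → t.Pairwise R₂ := by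
  intro s t F
  induction F with
  | nil => intro _; exact List.Pairwise.nil
  | @cons x y s t hxy F ih =>
    intro hp
    rw [List.pairwise_cons] at hp ⊢
    refine ⟨?_, ih hp.2⟩
    intro y' hy'
    obtain ⟨x', hx', hPx'⟩ := pvForall₂Mem F y' hy'
    exact hR x x' y y' hxy hPx' (hp.1 x' hx')

theorem pvQuadTransfer {α β : Type} (R₁ : α → α → Prop) (R₂ : β → β → Prop)
    (Rel : α → β → Prop) (l₁ : List α) (l₂ : List β)
    (hsym : ∀ {y y'}, R₂ y y' → R₂ y' y)
    (h₁ : ∀ x ∈ l₁, ∃ y ∈ l₂, Rel x y)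
    (hR : ∀ x x' y y', x ∈ l₁ → x' ∈ l₁ → Rel x y → Rel x' y' → R₁ x x' → R₂ y y')
    (hirr : ∀ y ∈ l₂, ¬ R₂ y y) :
    (∃ s : List α, s.Sublist l₁ ∧ s.length = 4 ∧ s.Pairwise R₁) →
    (∃ t : List β, t.Sublist l₂ ∧ t.length = 4 ∧ t.Pairwise R₂) := by
  rintro ⟨s, hsub, hlen, hpw⟩
  have hmem : ∀ x ∈ s, x ∈ l₁ := fun x hx => hsub.subset hx
  obtain ⟨t, F⟩ := pvPickList (fun x y => x ∈ l₁ ∧ y ∈ l₂ ∧ Rel x y) s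
    (fun x hx => by
      obtain ⟨y, hy, hrel⟩ := h₁ x (hmem x hx)
      exact ⟨y, hmem x hx, hy, hrel⟩)
  have htlen : t.length = 4 := F.length_eq ▸ hlen
  have htsub : ∀ y ∈ t, y ∈ l₂ := by
    intro y hy
    obtain ⟨x, _, _, h2, _⟩ := pvForall₂Mem F y hy
    exact h2
  have htpw : t.Pairwise R₂ :=
    pvForall₂Pairwise
      (fun x x' y y' hxy hx'y' h => hR x x' y y' hxy.1 hx'y'.1 hxy.2.2 hx'y'.2.2 h) F hpw
  have htnd : t.Nodup := by
    rw [List.Nodup]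
    apply List.pairwise_iff_forall_sublist.2
    intro a b hab
    have hR2 := List.pairwise_iff_forall_sublist.1 htpw hab
    intro hEq
    subst hEq
    exact hirr a (htsub a (hab.subset List.mem_cons_self)) hR2
  obtain ⟨u, hu_perm, hu_sub⟩ := List.subperm_of_subset htnd htsub
  refine ⟨u, hu_sub, hu_perm.length_eq.trans htlen, ?_⟩
  exact ((hu_perm.pairwise_iff fun h => hsym h)).2 htpw



-- ----- A's card_indices dict: the stored index points back to the card -----

def pvIdxD (cs : List (List Char)) (c : List Char) : Int :=
  ((PySem.List.enumerate cs 0).foldl (fun d p => d.insert p.2 p.1) PySem.Dict.empty).getD c (-1)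

theorem pvIdxD_spec (cs : List (List Char)) (c : List Char) (h : c ∈ cs) :
    ∃ n : Nat, ∃ hn : n < cs.length, cs[n] = c ∧ pvIdxD cs c = (n : Int) := by
  induction cs using List.reverseRecOn with
  | nil => cases h
  | append_singleton xs x ih =>
    by_cases hcx : c = x
    · subst hcx
      refine ⟨xs.length, by simp, by simp, ?_⟩
      unfold pvIdxD
      rw [PySem.List.enumerate_append, List.foldl_append]
      simp [PySem.List.enumerate, PySem.Dict.getD_insert_self]
    · have hc : c ∈ xs := by
        rcases List.mem_append.1 h with h1 | h1
        · exact h1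
        · simp only [List.mem_singleton] at h1; exact absurd h1 hcx
      obtain ⟨n, hn, he, hv⟩ := ih hc
      refine ⟨n, by simp; omega, ?_, ?_⟩
      · rw [List.getElem_append_left hn]; exact he
      · unfold pvIdxD at hv ⊢
        rw [PySem.List.enumerate_append, List.foldl_append]
        rw [show PySem.List.enumerate [x] (0 + ↑xs.length) = [((0:Int) + ↑xs.length, x)] from rfl,
          List.foldl_cons, List.foldl_nil, PySem.Dict.getD_insert_of_ne _ _ _ hcx]
        exact hv

theorem pvIdxD_getBack (cs : List (List Char)) (c : List Char) (h : c ∈ cs) :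
    PySem.List.pyGetD cs (pvIdxD cs c) [] = c := by
  obtain ⟨n, hn, he, hv⟩ := pvIdxD_spec cs c h
  rw [hv, PySem.List.pyGetD_natCast]
  rw [List.getD_eq_getElem _ _ hn]
  exact he

theorem pvIdxD_inj (cs : List (List Char)) {c c' : List Char} (h : c ∈ cs) (h' : c' ∈ cs)
    (he : pvIdxD cs c = pvIdxD cs c') : c = c' := by
  obtain ⟨n, hn, e, v⟩ := pvIdxD_spec cs c h
  obtain ⟨n', hn', e', v'⟩ := pvIdxD_spec cs c' h'
  rw [v, v'] at he
  have hnn : n = n' := by exact_mod_cast he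
  subst hnn; rw [← e, ← e']

-- ----- set-from-fold shape facts -----

theorem pvFoldlAddSublist {α : Type} [BEq α] (l : List α) :
    ∀ s : PySem.Set α, ∃ t : List α, t.Sublist l ∧ l.foldl PySem.Set.add s = s ++ t := by
  induction l with
  | nil => intro s; exact ⟨[], by simp⟩
  | cons x l ih =>
    intro s
    rw [List.foldl_cons]
    rcases (show PySem.Set.add s x = s ∨ PySem.Set.add s x = s ++ [x] by
      unfold PySem.Set.add; split <;> simp) with h | h
    · obtain ⟨t, ht, he⟩ := ih s
      rw [h, he]
      exact ⟨t, ht.cons _, rfl⟩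
    · obtain ⟨t, ht, he⟩ := ih (s ++ [x])
      rw [h, he]
      exact ⟨x :: t, ht.cons₂ _, by simp⟩

theorem pvOfListEqSelfOfLen {α : Type} [BEq α] [LawfulBEq α] (l : List α)
    (h : (PySem.Set.ofList l : List α).length = l.length) : PySem.Set.ofList l = l := by
  obtain ⟨t, ht, he⟩ := pvFoldlAddSublist l ([] : PySem.Set α)
  have hofl : PySem.Set.ofList l = t := by
    rw [show PySem.Set.ofList l = l.foldl PySem.Set.add [] from rfl, he, List.nil_append]
  rw [hofl] at h ⊢
  exact ht.eq_of_length h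


-- ----- the two validity predicates agree, and are invariant under permutation -----

theorem pvParseCard_eq (c : List Char) :
    pvParseCard c = (PySem.List.slice c none (some (-1)), PySem.List.pyGetD c (-1) ' ') := by
  unfold pvParseCard
  split
  · next h => rw [← h]
  · rfl

theorem pvRoyal_eq (hand : List (List Char)) :
    pvIsRoyalFlush hand =
      ((PySem.Set.len (PySem.Set.ofList (hand.map (fun c => PySem.List.pyGetD c (-1) ' '))) == 1)
        && PySem.Set.equal
            (PySem.Set.ofList (hand.map (fun c => PySem.List.slice c none (some (-1)))))
            pvRoyalValues) := by
  have h1 : hand.map (fun e => (pvParseCard e).1)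
      = hand.map (fun c => PySem.List.slice c none (some (-1))) := by
    simp [pvParseCard_eq]
  have h2 : hand.map (fun e => (pvParseCard e).2)
      = hand.map (fun c => PySem.List.pyGetD c (-1) ' ') := by
    simp [pvParseCard_eq]
  unfold pvIsRoyalFlush
  rw [show (PySem.Set.empty : PySem.Set (List Char)) = [] from rfl,
      show (PySem.Set.empty : PySem.Set Char) = [] from rfl]
  have hshape : (List.foldl
        (fun (p : PySem.Set (List Char) × PySem.Set Char) card =>
          (p.1.add (pvParseCard card).1, p.2.add (pvParseCard card).2)) ([], []) hand)
      = (List.foldl (fun (s : PySem.Set (List Char)) e => s.add (pvParseCard e).1) [] hand,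
         List.foldl (fun (s : PySem.Set Char) e => s.add (pvParseCard e).2) [] hand) :=
    PySem.List.foldl_prod_mk (fun (s : PySem.Set (List Char)) e => PySem.Set.add s (pvParseCard e).1)
      (fun (s : PySem.Set Char) e => PySem.Set.add s (pvParseCard e).2) hand [] []
  rw [hshape,
      ← PySem.Set.update_map_eq_foldl_add hand (fun e => (pvParseCard e).1) [],
      ← PySem.Set.update_map_eq_foldl_add hand (fun e => (pvParseCard e).2) [],
      PySem.Set.update_nil_left, PySem.Set.update_nil_left, h1, h2]

theorem pvFour_eq_any (vals : List (List Char)) :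
    (PySem.Dict.values (PySem.Dict.counter vals)).contains (4 : Int)
      = vals.any (fun v => PySem.List.count vals v == (4 : Int)) := by
  rw [Bool.eq_iff_iff]
  rw [show PySem.Dict.values (PySem.Dict.counter vals)
      = (PySem.Dict.counter vals).items.map (·.2) from rfl]
  rw [PySem.Dict.items_counter]
  simp only [List.contains_iff_mem, List.map_map, List.mem_map, Function.comp_def,
    List.any_eq_true, beq_iff_eq, PySem.List.count_eq, PySem.Set.mem_ofList]

theorem pvGoodAlt_eq (hand : List (List Char)) :
    pvGoodAlt hand =
      (if (hand.map (fun c => PySem.List.slice c none (some (-1)))).any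
            (fun v => PySem.List.count (hand.map (fun c => PySem.List.slice c none (some (-1)))) v
              == (4 : Int)) then true
       else
        (PySem.Set.len (PySem.Set.ofList (hand.map (fun c => PySem.List.pyGetD c (-1) ' '))) == 1)
          && PySem.Set.equal
              (PySem.Set.ofList (hand.map (fun c => PySem.List.slice c none (some (-1)))))
              pvRoyalValues) := rfl

theorem pvIsFour_eq (hand : List (List Char)) :
    pvIsFourOfAKind hand
      = (PySem.Dict.values
          (PySem.Dict.counter (hand.map (fun card => (pvParseCard card).1)))).contains (4 : Int) := rfl

theorem pvValid_eq_good (hand : List (List Char)) : pvValidHand hand = pvGoodAlt hand := by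
  have h1 : hand.map (fun card => (pvParseCard card).1)
      = hand.map (fun c => PySem.List.slice c none (some (-1))) := by
    simp [pvParseCard_eq]
  unfold pvValidHand
  rw [pvRoyal_eq, pvIsFour_eq, h1, pvFour_eq_any, pvGoodAlt_eq]
  cases (hand.map fun c => PySem.List.slice c none (some (-1))).any
      (fun v => PySem.List.count (hand.map fun c => PySem.List.slice c none (some (-1))) v
        == (4 : Int)) <;> simp

theorem pvOfListPerm {α : Type} [BEq α] [LawfulBEq α] {l l' : List α} (h : l.Perm l') :
    (PySem.Set.ofList l : List α).Perm (PySem.Set.ofList l') :=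
  (List.perm_ext_iff_of_nodup (PySem.Set.nodup_ofList l) (PySem.Set.nodup_ofList l')).2
    (fun a => by rw [PySem.Set.mem_ofList, PySem.Set.mem_ofList]; exact h.mem_iff)

theorem pvGood_perm {h1 h2 : List (List Char)} (hp : h1.Perm h2) :
    pvGoodAlt h1 = pvGoodAlt h2 := by
  have hvals : (h1.map (fun c => PySem.List.slice c none (some (-1)))).Perm
      (h2.map (fun c => PySem.List.slice c none (some (-1)))) := hp.map _
  have hsuits : (h1.map (fun c => PySem.List.pyGetD c (-1) ' ')).Perm
      (h2.map (fun c => PySem.List.pyGetD c (-1) ' ')) := hp.map _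
  have hany : (h1.map (fun c => PySem.List.slice c none (some (-1)))).any
        (fun v => PySem.List.count (h1.map (fun c => PySem.List.slice c none (some (-1)))) v == (4 : Int))
      = (h2.map (fun c => PySem.List.slice c none (some (-1)))).any
        (fun v => PySem.List.count (h2.map (fun c => PySem.List.slice c none (some (-1)))) v == (4 : Int)) := by
    rw [Bool.eq_iff_iff]
    simp only [List.any_eq_true, beq_iff_eq, PySem.List.count_eq]
    constructor
    · rintro ⟨v, hv, hc⟩
      exact ⟨v, hvals.mem_iff.1 hv, by rw [← hvals.count_eq]; exact hc⟩
    · rintro ⟨v, hv, hc⟩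
      exact ⟨v, hvals.mem_iff.2 hv, by rw [hvals.count_eq]; exact hc⟩
  have hlen : PySem.Set.len (PySem.Set.ofList (h1.map (fun c => PySem.List.pyGetD c (-1) ' ')))
      = PySem.Set.len (PySem.Set.ofList (h2.map (fun c => PySem.List.pyGetD c (-1) ' '))) := by
    rw [PySem.Set.len_eq, PySem.Set.len_eq, (pvOfListPerm hsuits).length_eq]
  have heq : PySem.Set.equal
        (PySem.Set.ofList (h1.map (fun c => PySem.List.slice c none (some (-1))))) pvRoyalValues
      = PySem.Set.equal
        (PySem.Set.ofList (h2.map (fun c => PySem.List.slice c none (some (-1))))) pvRoyalValues := by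
    rw [Bool.eq_iff_iff, PySem.Set.equal_iff, PySem.Set.equal_iff]
    constructor <;> intro h x
    · rw [PySem.Set.mem_ofList, ← hvals.mem_iff, ← PySem.Set.mem_ofList]; exact h x
    · rw [PySem.Set.mem_ofList, hvals.mem_iff, ← PySem.Set.mem_ofList]; exact h x
  rw [pvGoodAlt_eq, pvGoodAlt_eq, hany, hlen, heq]

-- ----- what A's all_valid_hands contains -----

def pvIdxSet (cs : List (List Char)) (combo : List (List Char)) : PySem.Set Int :=
  PySem.Set.ofList (combo.map (pvIdxD cs))

theorem pvInnerFold (cs : List (List Char)) (combo : List (List Char)) :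
    combo.foldl (fun s c => PySem.Set.add s
        (((PySem.List.enumerate cs 0).foldl (fun d p => d.insert p.2 p.1)
          PySem.Dict.empty).getD c (-1)))
      PySem.Set.empty = pvIdxSet cs combo := by
  rw [show (PySem.Set.empty : PySem.Set Int) = [] from rfl,
      ← PySem.Set.update_map_eq_foldl_add combo
        (fun c => (((PySem.List.enumerate cs 0).foldl (fun d p => d.insert p.2 p.1)
          PySem.Dict.empty).getD c (-1))) [],
      PySem.Set.update_nil_left]
  rfl

theorem pvAllValidHands_eq (cs : List (List Char)) :
    pvAllValidHands cs =
      ((PySem.List.combinations cs 5).filter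
        (fun combo => pvValidHand combo && (PySem.Set.len (pvIdxSet cs combo) == 5))).map
        (pvIdxSet cs) := by
  have hfun : ∀ (acc : List (PySem.Set Int)) (combo : List (List Char)),
      (if pvValidHand combo = true then
        (if PySem.Set.len (combo.foldl (fun s c => PySem.Set.add s
            (((PySem.List.enumerate cs 0).foldl (fun d p => d.insert p.2 p.1)
              PySem.Dict.empty).getD c (-1))) PySem.Set.empty) == 5
         then acc ++ [combo.foldl (fun s c => PySem.Set.add s
            (((PySem.List.enumerate cs 0).foldl (fun d p => d.insert p.2 p.1)
              PySem.Dict.empty).getD c (-1))) PySem.Set.empty] else acc)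
       else acc)
      = (if (pvValidHand combo && (PySem.Set.len (pvIdxSet cs combo) == 5)) = true
         then acc ++ [pvIdxSet cs combo] else acc) := by
    intro acc combo
    rw [pvInnerFold cs combo]
    by_cases hv : pvValidHand combo = true <;> simp [hv]
  have h0 : pvAllValidHands cs = (PySem.List.combinations cs 5).foldl
      (fun acc combo =>
        if (pvValidHand combo && (PySem.Set.len (pvIdxSet cs combo) == 5)) = true
        then acc ++ [pvIdxSet cs combo] else acc) [] := by
    rw [show pvAllValidHands cs = (PySem.List.combinations cs 5).foldl
        (fun (acc : List (PySem.Set Int)) combo =>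
          if pvValidHand combo = true then
            (if PySem.Set.len (combo.foldl (fun s c => PySem.Set.add s
                (((PySem.List.enumerate cs 0).foldl (fun d p => d.insert p.2 p.1)
                  PySem.Dict.empty).getD c (-1))) PySem.Set.empty) == 5
             then acc ++ [combo.foldl (fun s c => PySem.Set.add s
                (((PySem.List.enumerate cs 0).foldl (fun d p => d.insert p.2 p.1)
                  PySem.Dict.empty).getD c (-1))) PySem.Set.empty] else acc)
           else acc) [] from rfl]
    rw [funext (fun acc => funext (fun combo => hfun acc combo))]
  rw [h0, PySem.List.foldl_append_if
      (fun combo => pvValidHand combo && (PySem.Set.len (pvIdxSet cs combo) == 5))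
      (pvIdxSet cs) (PySem.List.combinations cs 5) []]
  rw [List.nil_append]

theorem pvMemAllValid (cs : List (List Char)) (S : PySem.Set Int) :
    S ∈ pvAllValidHands cs ↔ ∃ combo : List (List Char), combo.Sublist cs ∧ combo.length = 5 ∧
      pvValidHand combo = true ∧ PySem.Set.len (pvIdxSet cs combo) = 5 ∧ S = pvIdxSet cs combo := by
  rw [pvAllValidHands_eq]
  simp only [List.mem_map, List.mem_filter, PySem.List.mem_combinations_iff,
    Bool.and_eq_true, beq_iff_eq]
  constructor
  · rintro ⟨combo, ⟨⟨hs, hl⟩, hv, h5⟩, rfl⟩; exact ⟨combo, hs, hl, hv, h5, rfl⟩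
  · rintro ⟨combo, hs, hl, hv, h5, rfl⟩; exact ⟨combo, ⟨⟨hs, hl⟩, hv, h5⟩, rfl⟩

theorem pvLA_shape (cs : List (List Char)) (S : PySem.Set Int)
    (hS : S ∈ pvAllValidHands cs) :
    ∃ combo : List (List Char), combo.Sublist cs ∧ combo.length = 5 ∧ combo.Nodup ∧
      pvValidHand combo = true ∧ S = combo.map (pvIdxD cs) := by
  obtain ⟨combo, hs, hl, hv, h5, rfl⟩ := (pvMemAllValid cs _).1 hS
  have hl5 : (PySem.Set.ofList (combo.map (pvIdxD cs)) : List Int).length = 5 := by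
    have h' := h5
    rw [show pvIdxSet cs combo = PySem.Set.ofList (combo.map (pvIdxD cs)) from rfl,
      PySem.Set.len_eq] at h'
    exact_mod_cast h'
  have hlen : (PySem.Set.ofList (combo.map (pvIdxD cs)) : List Int).length
      = (combo.map (pvIdxD cs)).length := by
    rw [hl5, List.length_map, hl]
  have heq : PySem.Set.ofList (combo.map (pvIdxD cs)) = combo.map (pvIdxD cs) :=
    pvOfListEqSelfOfLen _ hlen
  have hnd : (combo.map (pvIdxD cs)).Nodup := heq ▸ PySem.Set.nodup_ofList _
  exact ⟨combo, hs, hl, hnd.of_map, hv,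
    by rw [show pvIdxSet cs combo = PySem.Set.ofList (combo.map (pvIdxD cs)) from rfl, heq]⟩

-- ----- what B's hands list contains -----

def pvLB (cs : List (List Char)) : List (PySem.Set (List Char)) :=
  ((PySem.List.combinations (PySem.List.dedup cs) 5).filter pvGoodAlt).map PySem.Set.ofList

theorem pvMemLB (cs : List (List Char)) (H : PySem.Set (List Char)) :
    H ∈ pvLB cs ↔ ∃ c : List (List Char), c.Sublist (PySem.List.dedup cs) ∧ c.length = 5 ∧
      pvGoodAlt c = true ∧ H = PySem.Set.ofList c := by
  unfold pvLB
  simp only [List.mem_map, List.mem_filter, PySem.List.mem_combinations_iff]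
  constructor
  · rintro ⟨c, ⟨⟨hs, hl⟩, hg⟩, rfl⟩; exact ⟨c, hs, hl, hg, rfl⟩
  · rintro ⟨c, hs, hl, hg, rfl⟩; exact ⟨c, ⟨⟨hs, hl⟩, hg⟩, rfl⟩

-- ----- the correspondence between A's index sets and B's card sets -----

def pvRel (cs : List (List Char)) (S : PySem.Set Int) (H : PySem.Set (List Char)) : Prop :=
  (H : List (List Char)).Perm (S.map (fun i => PySem.List.pyGetD cs i []))
    ∧ (S : List Int).Perm (H.map (pvIdxD cs))

theorem pvMapBack (cs : List (List Char)) (combo : List (List Char))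
    (h : ∀ c ∈ combo, c ∈ cs) :
    (combo.map (pvIdxD cs)).map (fun i => PySem.List.pyGetD cs i []) = combo := by
  rw [List.map_map]
  have h1 : combo.map ((fun i => PySem.List.pyGetD cs i []) ∘ pvIdxD cs)
      = combo.map (fun c => c) :=
    List.map_congr_left (fun c hc => pvIdxD_getBack cs c (h c hc))
  rw [h1, List.map_id']

theorem pvH1 (cs : List (List Char)) (S : PySem.Set Int)
    (hS : S ∈ pvAllValidHands cs) : ∃ H ∈ pvLB cs, pvRel cs S H := by
  obtain ⟨combo, hs, hl, hnd, hv, rfl⟩ := pvLA_shape cs S hS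
  have hsub : ∀ c ∈ combo, c ∈ cs := fun c hc => hs.subset hc
  have hnd2 : ((PySem.List.dedup cs).filter (fun c => combo.contains c)).Nodup :=
    (PySem.List.nodup_dedup cs).filter _
  have hperm : ((PySem.List.dedup cs).filter (fun c => combo.contains c)).Perm combo := by
    rw [List.perm_ext_iff_of_nodup hnd2 hnd]
    intro a
    simp only [List.mem_filter, PySem.List.mem_dedup, List.contains_iff_mem]
    exact ⟨fun h => h.2, fun h => ⟨hsub a h, h⟩⟩
  have hofl : PySem.Set.ofList ((PySem.List.dedup cs).filter (fun c => combo.contains c))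
      = (PySem.List.dedup cs).filter (fun c => combo.contains c) :=
    PySem.Set.ofList_eq_self_of_nodup _ hnd2
  have hgood : pvGoodAlt ((PySem.List.dedup cs).filter (fun c => combo.contains c)) = true := by
    rw [pvGood_perm hperm, ← pvValid_eq_good]; exact hv
  refine ⟨PySem.Set.ofList ((PySem.List.dedup cs).filter (fun c => combo.contains c)),
    (pvMemLB cs _).2 ⟨_, List.filter_sublist, hperm.length_eq.trans hl, hgood, rfl⟩, ?_, ?_⟩
  · rw [hofl, pvMapBack cs combo hsub]
    exact hperm
  · rw [hofl]
    exact (hperm.map (pvIdxD cs)).symm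

theorem pvH2 (cs : List (List Char)) (H : PySem.Set (List Char))
    (hH : H ∈ pvLB cs) : ∃ S ∈ pvAllValidHands cs, pvRel cs S H := by
  obtain ⟨c2, hs2, hl2, hg, rfl⟩ := (pvMemLB cs H).1 hH
  have hnd2 : c2.Nodup := hs2.nodup (PySem.List.nodup_dedup cs)
  have hsubcs : ∀ c ∈ c2, c ∈ cs := fun c hc => (PySem.List.mem_dedup cs c).1 (hs2.subset hc)
  obtain ⟨combo, hcp, hcs⟩ := List.subperm_of_subset hnd2 hsubcs
  have hndc : combo.Nodup := hcp.nodup_iff.2 hnd2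
  have hlen : combo.length = 5 := hcp.length_eq.trans hl2
  have hvalid : pvValidHand combo = true := by
    rw [pvValid_eq_good, pvGood_perm hcp]; exact hg
  have hinj : (combo.map (pvIdxD cs)).Nodup := by
    refine List.Nodup.map_on ?_ hndc
    intro x hx y hy he
    exact pvIdxD_inj cs (hcs.subset hx) (hcs.subset hy) he
  have hofl : pvIdxSet cs combo = combo.map (pvIdxD cs) :=
    PySem.Set.ofList_eq_self_of_nodup _ hinj
  have hlen5 : PySem.Set.len (pvIdxSet cs combo) = 5 := by
    rw [hofl, PySem.Set.len_eq, List.length_map, hlen]; norm_num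
  have hoflc : PySem.Set.ofList c2 = c2 := PySem.Set.ofList_eq_self_of_nodup _ hnd2
  refine ⟨pvIdxSet cs combo,
    (pvMemAllValid cs _).2 ⟨combo, hcs, hlen, hvalid, hlen5, rfl⟩, ?_, ?_⟩
  · rw [hofl, pvMapBack cs combo (fun c hc => hcs.subset hc), hoflc]
    exact hcp.symm
  · rw [hofl, hoflc]
    exact hcp.map (pvIdxD cs)

theorem pvRelDisj (cs : List (List Char)) {S S' : PySem.Set Int}
    {H H' : PySem.Set (List Char)} (h : pvRel cs S H) (h' : pvRel cs S' H') :
    (∀ i ∈ (S : List Int), i ∉ (S' : List Int))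
      ↔ (∀ c ∈ (H : List (List Char)), c ∉ (H' : List (List Char))) := by
  constructor
  · intro hd c hc hc'
    exact hd _ (h.2.mem_iff.2 (List.mem_map_of_mem hc))
      (h'.2.mem_iff.2 (List.mem_map_of_mem hc'))
  · intro hd i hi hi'
    exact hd _ (h.1.mem_iff.2 (List.mem_map_of_mem hi))
      (h'.1.mem_iff.2 (List.mem_map_of_mem hi'))

theorem pvIrrA (cs : List (List Char)) (S : PySem.Set Int)
    (hS : S ∈ pvAllValidHands cs) : ¬ (∀ i ∈ (S : List Int), i ∉ (S : List Int)) := by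
  obtain ⟨combo, hs, hl, hnd, hv, rfl⟩ := pvLA_shape cs S hS
  intro hcon
  cases combo with
  | nil => simp at hl
  | cons a t => exact hcon (pvIdxD cs a) (by simp) (by simp)

theorem pvIrrB (cs : List (List Char)) (H : PySem.Set (List Char))
    (hH : H ∈ pvLB cs) : ¬ (∀ c ∈ (H : List (List Char)), c ∉ (H : List (List Char))) := by
  obtain ⟨c2, hs2, hl2, hg, rfl⟩ := (pvMemLB cs H).1 hH
  intro hcon
  cases c2 with
  | nil => simp at hl2
  | cons a t =>
    have ha : a ∈ (PySem.Set.ofList (a :: t) : List (List Char)) :=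
      (PySem.Set.mem_ofList _ _).2 (by simp)
    exact hcon a ha ha

-- ===== VERDICT (by name: the statement is the Claim_ definition above) =====
theorem can_form_4_valid_hands_spec : Claim_equal_can_form_4_valid_hands := by
  intro cards _ _
  unfold Spec_can_form_4_valid_hands
  have hA : can_form_4_valid_hands cards
      = (PySem.List.combinations (pvAllValidHands (cards.map String.toList)) 4).any
          (fun q => (PySem.List.combinations q 2).all pvPairOk) := by
    unfold can_form_4_valid_hands
    rw [pvDfs_eq_any _ [] 4 rfl]
    exact PySem.List.any_congr_mem fun quad hmem =>
      pvGood_eq_pairs quad (PySem.List.length_of_mem_combinations hmem)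
  have hB : can_form_4_valid_hands_alt cards
      = (PySem.List.combinations (pvLB (cards.map String.toList)) 4).any
          (fun q => (PySem.List.combinations q 2).all pvPairOk) := by
    have hm : (fun pr => match pr with
        | [a, b] => PySem.Set.len (PySem.Set.inter a b) == 0
        | _ => true) = (pvPairOk (γ := List Char)) := by
      funext pr
      match pr with
      | [] => rfl
      | [a] => rfl
      | [a, b] => rfl
      | a :: b :: c :: t => rfl
    rw [show can_form_4_valid_hands_alt cards
        = ((PySem.List.combinations (pvLB (cards.map String.toList)) 4).any fun q =>
            (PySem.List.combinations q 2).all fun pr =>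
              match pr with
              | [a, b] => PySem.Set.len (PySem.Set.inter a b) == 0
              | _ => true) from rfl, hm]
  rw [hA, hB, Bool.eq_iff_iff, pvAnyQuadIff, pvAnyQuadIff]
  constructor
  · exact pvQuadTransfer _ _ (pvRel (cards.map String.toList)) _ _
      (fun hy x hx hx' => hy x hx' hx)
      (pvH1 (cards.map String.toList))
      (fun S S' H H' _ _ r r' hR1 => (pvRelDisj _ r r').1 hR1)
      (fun H hH => pvIrrB _ H hH)
  · exact pvQuadTransfer _ _ (fun H S => pvRel (cards.map String.toList) S H) _ _
      (fun hy x hx hx' => hy x hx' hx)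
      (fun H hH => pvH2 _ H hH)
      (fun H H' S S' _ _ r r' hR2 => (pvRelDisj _ r r').2 hR2)
      (fun S hS => pvIrrA _ S hS)
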